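-- pv_equiv track=rewrite | github.com/Mohit-Chaudhari/Level-Up-Coding | Arrays & Dynamic Arrays/multiplication_of_previous_and_next.py | solve
-- ===== SOURCE A (Python) =====
-- def solve(A):
--
--     ln = len(A)
--
--     if ln == 1:
--         return [A[0]]
--     arr = list()
--     for i in range(ln):
--         ans = 0
--         if i == 0:
--             ans = A[i] * A[i+1]
--         elif i == ln-1:
--             ans = A[i] * A[i-1]
--         else:
--             ans = A[i-1] * A[i+1]
--         arr.append(ans)
--     return arr
-- ===== SOURCE B (Python) =====
-- def solve(A):
--     if len(A) <= 1:
--         return list(A)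
--     prev = [A[0]] + A[:-1]
--     nxt = A[1:] + [A[-1]]
--     return [p * n for p, n in zip(prev, nxt)]
-- ===== Notes on version B (the rewrite author's own statement) =====
-- stated objective: simpler
-- what changed: Replaces the per-index first/last/middle branching loop with two shifted neighbor arrays (prev = [A[0]]+A[:-1], nxt = A[1:]+[A[-1]]) multiplied pairwise via zip.
import Mathlib
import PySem

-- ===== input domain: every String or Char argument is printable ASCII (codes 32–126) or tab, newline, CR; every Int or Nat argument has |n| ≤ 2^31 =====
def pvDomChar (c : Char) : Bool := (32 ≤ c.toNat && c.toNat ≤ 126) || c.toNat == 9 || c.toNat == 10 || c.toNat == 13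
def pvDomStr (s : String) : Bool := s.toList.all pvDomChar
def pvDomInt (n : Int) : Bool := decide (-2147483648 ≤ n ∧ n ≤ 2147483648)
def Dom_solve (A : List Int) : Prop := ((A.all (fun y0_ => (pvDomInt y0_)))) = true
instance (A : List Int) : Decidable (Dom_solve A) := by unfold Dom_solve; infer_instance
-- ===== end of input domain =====

-- B replaces A's per-index first/last/middle branching with two shifted neighbor lists multiplied pairwise (objective: simpler).

-- ===== PORT A =====
def solve (A : List Int) : List Int :=
  if (A.length : Int) = 1 then [PySem.List.pyGetD A 0 0]
  else
    (PySem.List.pyRange 0 (A.length : Int) 1).foldl (fun arr i =>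
      arr ++ [if i = 0 then PySem.List.pyGetD A i 0 * PySem.List.pyGetD A (i+1) 0
              else if i = (A.length : Int) - 1 then PySem.List.pyGetD A i 0 * PySem.List.pyGetD A (i-1) 0
              else PySem.List.pyGetD A (i-1) 0 * PySem.List.pyGetD A (i+1) 0]) []

-- ===== PORT B =====
def solve_alt (A : List Int) : List Int :=
  if A.length ≤ 1 then A
  else
    let prev := [PySem.List.pyGetD A 0 0] ++ A.dropLast       -- [A[0]] + A[:-1]
    let nxt := A.tail ++ [PySem.List.pyGetD A (-1) 0]         -- A[1:] + [A[-1]]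
    List.zipWith (· * ·) prev nxt

-- ===== PRECONDITION & SPEC =====
def Spec_solve (A : List Int) (out : List Int) : Prop := out = solve_alt A
instance (A : List Int) (out : List Int) : Decidable (Spec_solve A out) := by unfold Spec_solve; infer_instance

-- ===== CLAIM (what is proved, stated in full; the proofs are below) =====
def Claim_equal_solve : Prop := ∀ (A : List Int), Dom_solve A → Spec_solve A (solve A)

-- ===== LEMMAS AND PROOFS =====

theorem solve_eq_map (A : List Int) (h : A.length ≠ 1) :
    solve A = (List.range A.length).map (fun (k : Nat) =>
      if (k : Int) = 0 then PySem.List.pyGetD A (k : Int) 0 * PySem.List.pyGetD A ((k : Int)+1) 0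
      else if (k : Int) = (A.length : Int) - 1 then PySem.List.pyGetD A (k : Int) 0 * PySem.List.pyGetD A ((k : Int)-1) 0
      else PySem.List.pyGetD A ((k : Int)-1) 0 * PySem.List.pyGetD A ((k : Int)+1) 0) := by
  unfold solve
  rw [if_neg (by exact_mod_cast h)]
  rw [PySem.List.foldl_append_singleton_eq_map, List.nil_append, PySem.List.pyRange_one]
  simp only [sub_zero, Int.toNat_natCast, List.map_map]
  apply List.map_congr_left
  intro k _
  simp only [Function.comp_apply, zero_add]

theorem pyGetD_int (A : List Int) (i : Int) (j : Nat) (hj : j < A.length) (hij : i = (j : Int)) :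
    PySem.List.pyGetD A i 0 = A[j] := by
  subst hij
  rw [PySem.List.pyGetD_eq_getElem A 0 (by omega) (by exact_mod_cast hj)]
  simp

-- ===== VERDICT (by name: the statement is the Claim_ definition above) =====
theorem solve_spec : Claim_equal_solve := by
  intro A _
  unfold Spec_solve solve_alt
  by_cases hs : A.length ≤ 1
  · rw [if_pos hs]
    match A, hs with
    | [], _ => decide
    | [x], _ => simp [solve, PySem.List.pyGetD_ofNat']
  · rw [if_neg hs]
    rw [not_le] at hs
    have hne : A ≠ [] := by intro h; subst h; simp at hs
    rw [solve_eq_map A (by omega)]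
    rw [PySem.List.pyGetD_neg_one A 0 hne, List.getLast_eq_getElem]
    rw [pyGetD_int A 0 0 (by omega) (by norm_num)]
    apply List.ext_getElem
    · simp only [List.length_map, List.length_range, List.length_zipWith,
        List.length_append, List.length_singleton, List.length_dropLast, List.length_tail]
      omega
    · intro k hk1 hk2
      simp only [List.length_map, List.length_range] at hk1
      rw [List.getElem_map, List.getElem_range, List.getElem_zipWith]
      by_cases h0 : k = 0
      · rw [if_pos (show (k : Int) = 0 by exact_mod_cast h0)]
        rw [pyGetD_int A (k : Int) k hk1 rfl]
        rw [pyGetD_int A ((k : Int) + 1) (k + 1) (by omega) (by push_cast; ring)]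
        rw [List.getElem_append_left (by simp [h0])]
        rw [List.getElem_append_left (by simp [List.length_tail]; omega)]
        rw [List.getElem_tail]
        simp [h0]
      · have hk1' : 1 ≤ k := Nat.one_le_iff_ne_zero.mpr h0
        rw [if_neg (by exact_mod_cast h0)]
        rw [pyGetD_int A ((k : Int) - 1) (k - 1) (by omega) (by omega)]
        rw [List.getElem_append_right (by simp [hk1'])]
        simp only [List.length_singleton]
        rw [List.getElem_dropLast]
        by_cases hl : k = A.length - 1
        · rw [if_pos (by omega)]
          rw [pyGetD_int A (k : Int) k hk1 rfl]
          rw [List.getElem_append_right (by simp [List.length_tail]; omega)]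
          simp only [List.length_tail, List.getElem_singleton]
          subst hl
          exact mul_comm _ _
        · rw [if_neg (by omega)]
          rw [pyGetD_int A ((k : Int) + 1) (k + 1) (by omega) (by push_cast; ring)]
          rw [List.getElem_append_left (by simp [List.length_tail]; omega)]
          rw [List.getElem_tail]
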